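-- pv_equiv track=rewrite | github.com/iliasamodin/tasks_for_yandex_job-python3.11.1 | internship_tasks/perfectionism_is_problem.py | sculptures_completion_calculation
-- ===== SOURCE A (Python) =====
-- def sculptures_completion_calculation(
--     desired_weight,
--     remaining_time_in_minutes,
--     list_with_weight_of_sculptures
-- ):
--
--     positions_and_weights_of_sculptures = [
--         (str(sculpture_position), int(sculpture_weight))
--         for sculpture_position, sculpture_weight in enumerate(
--             list_with_weight_of_sculptures,
--             start=1
--         )
--     ]
--     positions_and_weights_of_sculptures.sort(
--         # A comparator that returns the difference between
--         #   the sculpture's desired weight and its actual weight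
--         key=lambda position_and_weight:
--         abs(desired_weight - position_and_weight[1])
--     )
--
--     # Iterate through all the sculptures
--     #   sorted in order of how close their weight
--     #   is to the desired weight of the sculpture
--     #   and check if it is possible to process the sculpture
--     #   obtained in the current iteration in the remaining time
--     number_of_completed_sculptures = 0
--     positions_of_completed_sculptures = []
--     for sculpture_position, sculpture_weight in \
--     positions_and_weights_of_sculptures:
--         weight_of_modification = abs(desired_weight - sculpture_weight)
--         if weight_of_modification <= remaining_time_in_minutes:
--             number_of_completed_sculptures += 1
--             positions_of_completed_sculptures.append(sculpture_position)
--             remaining_time_in_minutes -= weight_of_modification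
--         else:
--             break
--
--     return number_of_completed_sculptures, positions_of_completed_sculptures
-- ===== SOURCE B (Python) =====
-- def sculptures_completion_calculation(
--     desired_weight,
--     remaining_time_in_minutes,
--     list_with_weight_of_sculptures
-- ):
--     # sort (cost, position) pairs by cost; stable sort keeps A's tie order
--     pairs = sorted(
--         [
--             (abs(desired_weight - weight), str(position))
--             for position, weight in enumerate(list_with_weight_of_sculptures, start=1)
--         ],
--         key=lambda pair: pair[0],
--     )
--     # prefix sums of the sorted costs
--     prefix_sums = []
--     total = 0
--     for cost, _ in pairs:
--         total += cost
--         prefix_sums.append(total)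
--     # binary search: number of leading prefix sums <= the time budget
--     lo, hi = 0, len(prefix_sums)
--     while lo < hi:
--         mid = (lo + hi) // 2
--         if remaining_time_in_minutes < prefix_sums[mid]:
--             hi = mid
--         else:
--             lo = mid + 1
--     return lo, [position for _, position in pairs[:lo]]
-- ===== Notes on version B (the rewrite author's own statement) =====
-- stated objective: alternative
-- what changed: The stateful greedy loop that decrements a remaining-time counter is replaced by prefix sums of the sorted costs plus a bisect-right binary search that finds how many leading sculptures fit the budget, then slices the sorted pair list.
import Mathlib
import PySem

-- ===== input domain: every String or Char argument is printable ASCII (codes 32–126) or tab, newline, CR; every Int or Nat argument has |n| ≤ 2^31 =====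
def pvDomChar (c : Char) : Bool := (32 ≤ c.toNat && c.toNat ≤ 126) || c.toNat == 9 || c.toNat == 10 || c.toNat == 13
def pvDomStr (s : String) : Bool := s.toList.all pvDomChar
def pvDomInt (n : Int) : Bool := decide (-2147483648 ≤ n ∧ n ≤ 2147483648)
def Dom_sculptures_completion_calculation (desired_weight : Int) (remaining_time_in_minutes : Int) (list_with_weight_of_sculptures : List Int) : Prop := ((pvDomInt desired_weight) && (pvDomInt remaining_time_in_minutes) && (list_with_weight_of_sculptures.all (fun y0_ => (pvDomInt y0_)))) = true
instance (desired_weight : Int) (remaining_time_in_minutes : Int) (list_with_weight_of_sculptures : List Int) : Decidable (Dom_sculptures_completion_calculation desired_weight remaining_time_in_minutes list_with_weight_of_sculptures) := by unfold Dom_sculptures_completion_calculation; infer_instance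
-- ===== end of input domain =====

-- A's greedy budget-decrementing scan is re-implemented in B as prefix sums of the
-- sorted costs plus a bisect-right binary search (alternative algorithm, same cost).


-- ===== PORT A =====
-- A's for-loop with break, carried state: remaining time, count, appended positions
def pvLoopA (d : Int) : List (String × Int) → Int → Int → List String → Int × List String
  | [], _, n, acc => (n, acc)
  | (pos, w) :: rest, t, n, acc =>
      let m := |d - w|
      if m ≤ t then pvLoopA d rest (t - m) (n + 1) (acc ++ [pos]) else (n, acc)

def sculptures_completion_calculation (desired_weight : Int) (remaining_time_in_minutes : Int) (list_with_weight_of_sculptures : List Int) : Int × List String :=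
  let positions_and_weights := (PySem.List.enumerate list_with_weight_of_sculptures 1).map
    (fun p => (PySem.Int.toStr p.1, p.2))
  let sortedList := PySem.List.sorted positions_and_weights (fun p => |desired_weight - p.2|)
  pvLoopA desired_weight sortedList remaining_time_in_minutes 0 []

-- ===== PORT B =====
-- the prefix-sum loop: total += cost; prefix.append(total)
def pvPrefix : List Int → Int → List Int
  | [], _ => []
  | c :: rest, total => (total + c) :: pvPrefix rest (total + c)

-- the bisect-right while loop; a[mid] is always in range (0 ≤ lo ≤ mid < hi ≤ len), getD is exact there
def pvBisect (a : List Int) (x : Int) (lo hi : Nat) : Nat :=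
  if _h : lo < hi then
    let mid := (lo + hi) / 2
    if x < a.getD mid 0 then pvBisect a x lo mid else pvBisect a x (mid + 1) hi
  else lo
termination_by hi - lo
decreasing_by all_goals omega

def sculptures_completion_calculation_alt (desired_weight : Int) (remaining_time_in_minutes : Int) (list_with_weight_of_sculptures : List Int) : Int × List String :=
  let pairs := PySem.List.sorted
    ((PySem.List.enumerate list_with_weight_of_sculptures 1).map
      (fun p => (|desired_weight - p.2|, PySem.Int.toStr p.1)))
    (fun p => p.1)
  let prefix_sums := pvPrefix (pairs.map (·.1)) 0
  let lo := pvBisect prefix_sums remaining_time_in_minutes 0 prefix_sums.length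
  ((lo : Int), (pairs.take lo).map (·.2))

-- ===== PRECONDITION & SPEC =====
def Spec_sculptures_completion_calculation (desired_weight : Int) (remaining_time_in_minutes : Int) (list_with_weight_of_sculptures : List Int) (out : Int × List String) : Prop := out = sculptures_completion_calculation_alt desired_weight remaining_time_in_minutes list_with_weight_of_sculptures
instance (desired_weight : Int) (remaining_time_in_minutes : Int) (list_with_weight_of_sculptures : List Int) (out : Int × List String) : Decidable (Spec_sculptures_completion_calculation desired_weight remaining_time_in_minutes list_with_weight_of_sculptures out) := by unfold Spec_sculptures_completion_calculation; infer_instance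

-- ===== CLAIM (what is proved, stated in full; the proofs are below) =====
def Claim_equal_sculptures_completion_calculation : Prop := ∀ (desired_weight : Int) (remaining_time_in_minutes : Int) (list_with_weight_of_sculptures : List Int), Dom_sculptures_completion_calculation desired_weight remaining_time_in_minutes list_with_weight_of_sculptures → Spec_sculptures_completion_calculation desired_weight remaining_time_in_minutes list_with_weight_of_sculptures (sculptures_completion_calculation desired_weight remaining_time_in_minutes list_with_weight_of_sculptures)

-- ===== LEMMAS AND PROOFS =====

-- greedy count of leading costs that fit into budget t
def pvGCount : Int → List Int → Nat
  | _, [] => 0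
  | t, c :: cs => if c ≤ t then pvGCount (t - c) cs + 1 else 0

theorem pvGCount_le_length (t : Int) (cs : List Int) : pvGCount t cs ≤ cs.length := by
  induction cs generalizing t with
  | nil => simp [pvGCount]
  | cons c cs ih =>
    simp only [pvGCount]
    split
    · exact Nat.succ_le_succ (ih _)
    · simp

-- A's loop computes the greedy count and the corresponding position prefix
theorem pvLoopA_spec (d : Int) (s : List (String × Int)) :
    ∀ (t n : Int) (acc : List String),
    pvLoopA d s t n acc =
      (n + (pvGCount t (s.map (fun p => |d - p.2|)) : Int),
       acc ++ (s.take (pvGCount t (s.map (fun p => |d - p.2|)))).map (·.1)) := by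
  induction s with
  | nil => intro t n acc; simp [pvLoopA, pvGCount]
  | cons p rest ih =>
    intro t n acc
    obtain ⟨pos, w⟩ := p
    simp only [pvLoopA, List.map_cons, pvGCount]
    split
    · rw [ih]
      simp only [List.take_succ_cons, List.map_cons, Prod.mk.injEq]
      constructor
      · push_cast; ring
      · simp
    · simp

-- shift lemma for prefix sums
theorem pvPrefix_shift (cs : List Int) : ∀ a : Int, pvPrefix cs a = (pvPrefix cs 0).map (a + ·) := by
  induction cs with
  | nil => intro a; simp [pvPrefix]
  | cons c cs ih =>
    intro a
    simp only [pvPrefix, List.map_cons]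
    rw [ih (a + c), ih (0 + c), List.map_map]
    congr 1
    · omega
    · congr 1
      funext x; simp; omega

theorem pvPrefix_length (cs : List Int) : ∀ a, (pvPrefix cs a).length = cs.length := by
  induction cs with
  | nil => intro a; simp [pvPrefix]
  | cons c cs ih => intro a; simp [pvPrefix, ih]

theorem pvPrefix_nonneg : ∀ (cs : List Int), (∀ c ∈ cs, 0 ≤ c) → ∀ p ∈ pvPrefix cs 0, 0 ≤ p := by
  intro cs
  induction cs with
  | nil => intro _; simp [pvPrefix]
  | cons x xs ih =>
    intro hcs q hq
    simp only [pvPrefix, zero_add, List.mem_cons] at hq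
    rcases hq with h | h
    · have hx := hcs x (by simp); omega
    · rw [pvPrefix_shift] at h
      obtain ⟨r, hr, rfl⟩ := List.mem_map.mp h
      have h1 := ih (fun y hy => hcs y (by simp [hy])) r hr
      have h2 := hcs x (by simp)
      omega

-- the characterising property: prefix_sums[i] ≤ t iff i < greedy count
theorem pvGCount_char (cs : List Int) (hcs : ∀ c ∈ cs, 0 ≤ c) :
    ∀ (t : Int) (i : Nat), i < cs.length →
      ((pvPrefix cs 0).getD i 0 ≤ t ↔ i < pvGCount t cs) := by
  induction cs with
  | nil => intro t i hi; simp at hi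
  | cons c cs ih =>
    intro t i hi
    have hc : 0 ≤ c := hcs c (by simp)
    have hcs' : ∀ x ∈ cs, 0 ≤ x := fun x hx => hcs x (by simp [hx])
    simp only [pvPrefix, zero_add, pvGCount]
    match i with
    | 0 =>
      simp only [List.getD_cons_zero]
      split
      · omega
      · omega
    | j + 1 =>
      have hj : j < cs.length := by simpa using hi
      have hjlen : j < (pvPrefix cs 0).length := by rw [pvPrefix_length]; exact hj
      have hget : (pvPrefix cs c).getD j 0 = c + (pvPrefix cs 0).getD j 0 := by
        rw [pvPrefix_shift, List.getD_eq_getElem?_getD, List.getD_eq_getElem?_getD,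
            List.getElem?_map, List.getElem?_eq_getElem hjlen]
        simp
      simp only [List.getD_cons_succ, hget]
      split
      · rename_i h
        have := ih hcs' (t - c) j hj
        constructor
        · intro hle; have : j < pvGCount (t - c) cs := (ih hcs' (t - c) j hj).mp (by omega); omega
        · intro hlt; have : (pvPrefix cs 0).getD j 0 ≤ t - c := (ih hcs' (t - c) j hj).mpr (by omega); omega
      · rename_i h
        have hp : 0 ≤ (pvPrefix cs 0).getD j 0 := by
          rw [List.getD_eq_getElem?_getD, List.getElem?_eq_getElem hjlen]
          exact pvPrefix_nonneg cs hcs' _ (by simp)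
        constructor
        · intro hle; omega
        · intro hlt; omega

-- bisect-right returns c when a[i] ≤ x exactly for i < c
theorem pvBisect_eq (a : List Int) (x : Int) (c : Nat)
    (H : ∀ i < a.length, (a.getD i 0 ≤ x ↔ i < c)) :
    ∀ (k lo hi : Nat), hi - lo ≤ k → lo ≤ c → c ≤ hi → hi ≤ a.length →
      pvBisect a x lo hi = c := by
  intro k
  induction k with
  | zero =>
    intro lo hi hk h1 h2 h3
    rw [pvBisect]
    have : ¬ lo < hi := by omega
    simp only [this, dite_false]
    omega
  | succ k ih =>
    intro lo hi hk h1 h2 h3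
    rw [pvBisect]
    by_cases hlh : lo < hi
    · simp only [hlh, dite_true]
      have hmid1 : lo ≤ (lo + hi) / 2 := by omega
      have hmid2 : (lo + hi) / 2 < hi := by omega
      have hmlen : (lo + hi) / 2 < a.length := by omega
      by_cases hx : x < a.getD ((lo + hi) / 2) 0
      · simp only [hx, if_true]
        have : ¬ ((lo + hi) / 2 < c) := fun h => by
          have := (H _ hmlen).mpr h; omega
        exact ih lo ((lo + hi) / 2) (by omega) h1 (by omega) (by omega)
      · simp only [hx, if_false]
        have : (lo + hi) / 2 < c := (H _ hmlen).mp (by omega)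
        exact ih ((lo + hi) / 2 + 1) hi (by omega) (by omega) h2 h3
    · simp only [hlh, dite_false]; omega

-- stable sort commutes with a key-preserving map (proved via the foldl/insertBy form)
theorem map_insertBy {α β : Type} (f : α → β) (cmp : α → α → Bool) (cmp' : β → β → Bool)
    (hcmp : ∀ a b, cmp' (f a) (f b) = cmp a b) (x : α) (ys : List α) :
    (PySem.List.insertBy cmp x ys).map f = PySem.List.insertBy cmp' (f x) (ys.map f) := by
  induction ys with
  | nil => simp [PySem.List.insertBy]
  | cons y ys ih =>
    simp only [PySem.List.insertBy, List.map_cons, hcmp]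
    split <;> simp_all

theorem map_sorted {α β κ : Type} [LinearOrder κ] (f : α → β)
    (key1 : α → κ) (key2 : β → κ) (hk : ∀ a, key2 (f a) = key1 a) (xs : List α) :
    PySem.List.sorted (xs.map f) key2 = (PySem.List.sorted xs key1).map f := by
  rw [PySem.List.sorted_eq_foldl_insertBy, PySem.List.sorted_eq_foldl_insertBy]
  induction xs using List.reverseRecOn with
  | nil => simp
  | append_singleton xs x ih =>
    simp only [List.map_append, List.map_cons, List.map_nil, List.foldl_append, List.foldl_cons,
      List.foldl_nil, ih]
    rw [map_insertBy f (fun a b => decide (key1 a < key1 b))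
      (fun a b => decide (key2 a < key2 b)) (by
        intro a b
        show decide (key2 (f a) < key2 (f b)) = decide (key1 a < key1 b)
        rw [hk, hk])]

-- ===== VERDICT (by name: the statement is the Claim_ definition above) =====
theorem sculptures_completion_calculation_spec : Claim_equal_sculptures_completion_calculation := by
  intro d t ws _
  unfold Spec_sculptures_completion_calculation
  unfold sculptures_completion_calculation sculptures_completion_calculation_alt
  simp only []
  set base := PySem.List.enumerate ws 1 with hbase
  set f : (String × Int) → (Int × String) := fun p => (|d - p.2|, p.1) with hf
  have hmap : (base.map (fun p => (|d - p.2|, PySem.Int.toStr p.1)))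
      = (base.map (fun p => (PySem.Int.toStr p.1, p.2))).map f := by
    rw [List.map_map]; rfl
  set sA := PySem.List.sorted (base.map (fun p => (PySem.Int.toStr p.1, p.2)))
    (fun p => |d - p.2|) with hsA
  have hsB : PySem.List.sorted (base.map (fun p => (|d - p.2|, PySem.Int.toStr p.1)))
      (fun p : Int × String => p.1) = sA.map f := by
    rw [hmap, map_sorted f (fun p => |d - p.2|) (fun p => p.1) (fun a => rfl)]
  rw [hsB]
  set cs := sA.map (fun p => |d - p.2|) with hcs
  have hcsB : (sA.map f).map (·.1) = cs := by simp [hf, hcs, List.map_map]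
  have hnn : ∀ c ∈ cs, 0 ≤ c := by
    intro c hc
    obtain ⟨p, _, rfl⟩ := List.mem_map.mp hc
    exact abs_nonneg _
  set k := pvGCount t cs with hk
  have hbis : pvBisect (pvPrefix ((sA.map f).map (·.1)) 0) t 0
      (pvPrefix ((sA.map f).map (·.1)) 0).length = k := by
    rw [hcsB]
    exact pvBisect_eq (pvPrefix cs 0) t k
      (by
        intro i hi
        rw [pvPrefix_length] at hi
        exact pvGCount_char cs hnn t i hi)
      (pvPrefix cs 0).length 0 (pvPrefix cs 0).length (by omega) (by omega)
      (by rw [pvPrefix_length]; exact pvGCount_le_length t cs)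
      (le_refl _)
  rw [pvLoopA_spec, hbis]
  simp only [Prod.mk.injEq]
  constructor
  · rw [← hcs]; simp [hk]
  · rw [← hcs, ← hk, List.nil_append, ← List.map_take, List.map_map]
    have hcomp : ((fun x : Int × String => x.2) ∘ f) = (fun x : String × Int => x.1) := rfl
    rw [hcomp]
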